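-- pv_equiv track=rewrite | github.com/bnbbbb/Algotithm | 백준/Silver/21921. 블로그/블로그.py | count_visited
-- ===== SOURCE A (Python) =====
-- def count_visited(n, x, visited):
--     count_max_visit = 1
--     current_sum = sum(visited[:x])
--     max_visit = current_sum
--
--     for i in range(x, n):
--         current_sum = current_sum - visited[i - x] + visited[i]
--
--         if current_sum > max_visit:
--             max_visit = current_sum
--             count_max_visit = 1
--         elif current_sum == max_visit:
--             count_max_visit += 1
--
--     return max_visit, count_max_visit
-- ===== SOURCE B (Python) =====
-- def count_visited(n, x, visited):
--     P = [0]
--     for v in visited: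
--         P.append(P[-1] + v)
--     windows = [P[min(x, len(visited))]]
--     for i in range(x, n):
--         windows.append(P[i + 1] - P[i + 1 - x])
--     max_visit = max(windows)
--     return max_visit, windows.count(max_visit)
-- ===== Notes on version B (the rewrite author's own statement) =====
-- stated objective: alternative
-- what changed: B replaces A's rolling-sum loop with per-state max/count bookkeeping by a prefix-sum array, materialising the list of all window sums and reducing it with max() and list.count().
-- outside the precondition, e.g. on count_visited(0, -1, [1, 2]): A returns (2, 1), B returns (3, 1)
import Mathlib
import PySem

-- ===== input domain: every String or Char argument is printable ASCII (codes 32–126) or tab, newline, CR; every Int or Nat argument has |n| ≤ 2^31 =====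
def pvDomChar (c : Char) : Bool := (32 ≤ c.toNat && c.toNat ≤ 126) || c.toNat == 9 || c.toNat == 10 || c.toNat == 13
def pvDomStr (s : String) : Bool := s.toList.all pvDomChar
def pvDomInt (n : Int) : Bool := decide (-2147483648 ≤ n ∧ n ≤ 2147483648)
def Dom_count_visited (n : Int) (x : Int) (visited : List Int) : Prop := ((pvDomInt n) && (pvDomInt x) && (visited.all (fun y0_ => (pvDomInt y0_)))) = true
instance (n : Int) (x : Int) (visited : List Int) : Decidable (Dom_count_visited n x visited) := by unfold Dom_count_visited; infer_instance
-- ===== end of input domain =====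

-- B computes the same (max window sum, count) via a prefix-sum array, a materialised list of window sums, max() and list.count() — an alternative decomposition of A's rolling-sum loop.
-- Pre_ excludes negative window sizes x (where A's values come from Python's negative-index wraparound, an accident of the implementation) and n > len(visited) with x < n (where A raises IndexError).


-- ===== PORT A =====
def count_visited (n : Int) (x : Int) (visited : List Int) : Int × Int :=
  -- count_max_visit = 1; current_sum = sum(visited[:x]); max_visit = current_sum
  let cs0 : Int := (PySem.List.slice visited none (some x)).sum
  -- for i in range(x, n): … (state = (current_sum, max_visit, count_max_visit))
  let st := (PySem.List.pyRange x n 1).foldl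
    (fun (st : Int × Int × Int) i =>
      let cs := st.1 - PySem.List.pyGetD visited (i - x) 0 + PySem.List.pyGetD visited i 0
      if cs > st.2.1 then (cs, cs, 1)
      else if cs = st.2.1 then (cs, st.2.1, st.2.2 + 1)
      else (cs, st.2.1, st.2.2))
    (cs0, cs0, 1)
  (st.2.1, st.2.2)

-- ===== PORT B =====
-- B-side helper: P = [0]; for v in visited: P.append(P[-1] + v)
def pvPrefix (visited : List Int) : List Int :=
  visited.foldl (fun P v => P ++ [PySem.List.pyGetD P (-1) 0 + v]) [0]

def count_visited_alt (n : Int) (x : Int) (visited : List Int) : Int × Int :=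
  let P := pvPrefix visited
  -- windows = [P[min(x, len(visited))]]; for i in range(x, n): windows.append(P[i+1] - P[i+1-x])
  let windows := (PySem.List.pyRange x n 1).foldl
    (fun w i => w ++ [PySem.List.pyGetD P (i + 1) 0 - PySem.List.pyGetD P (i + 1 - x) 0])
    [PySem.List.pyGetD P (min x (visited.length : Int)) 0]
  -- max_visit = max(windows); return max_visit, windows.count(max_visit)
  let m := (PySem.List.max? windows (fun y => y)).getD 0
  (m, (PySem.List.count windows m : Int))

-- ===== PRECONDITION & SPEC =====
-- Pre_ restricts to the natural domain 0 ≤ x and excludes n > len(visited) with x < n, where A raises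
-- IndexError; for x < 0 (outside the natural domain) A's occasional values come from negative-index wraparound.
def Pre_count_visited (n : Int) (x : Int) (visited : List Int) : Prop :=
  0 ≤ x ∧ (n ≤ (visited.length : Int) ∨ n ≤ x)
instance (n : Int) (x : Int) (visited : List Int) : Decidable (Pre_count_visited n x visited) := by
  unfold Pre_count_visited; infer_instance
def pvWitness_count_visited : Int × Int × List Int := (4, 2, [1, 4, 2, 5])

def Spec_count_visited (n : Int) (x : Int) (visited : List Int) (out : Int × Int) : Prop := out = count_visited_alt n x visited
instance (n : Int) (x : Int) (visited : List Int) (out : Int × Int) : Decidable (Spec_count_visited n x visited out) := by unfold Spec_count_visited; infer_instance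

-- ===== CLAIM (what is proved, stated in full; the proofs are below) =====
def Claim_equal_count_visited : Prop := ∀ (n : Int) (x : Int) (visited : List Int), Dom_count_visited n x visited → Pre_count_visited n x visited → Spec_count_visited n x visited (count_visited n x visited)

-- ===== LEMMAS AND PROOFS =====

-- window sum ending at position j (length-x window [j-x, j))
def pvW (visited : List Int) (x j : Int) : Int :=
  (visited.take j.toNat).sum - (visited.take (j - x).toNat).sum

-- A's loop body as a function of the freshly computed window sum
def pvStep2 (st : Int × Int × Int) (w : Int) : Int × Int × Int :=
  if w > st.2.1 then (w, w, 1)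
  else if w = st.2.1 then (w, st.2.1, st.2.2 + 1)
  else (w, st.2.1, st.2.2)

lemma pvPrefix_append (ys : List Int) (v : Int) :
    pvPrefix (ys ++ [v]) = pvPrefix ys ++ [PySem.List.pyGetD (pvPrefix ys) (-1) 0 + v] := by
  simp [pvPrefix, List.foldl_append]

lemma pvPrefix_eq (visited : List Int) :
    pvPrefix visited = (List.range (visited.length + 1)).map (fun k => (visited.take k).sum) := by
  induction visited using List.reverseRecOn with
  | nil => rfl
  | append_singleton ys v ih =>
    rw [pvPrefix_append, ih]
    have hlast : (List.range (ys.length + 1)).map (fun k => (ys.take k).sum)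
        = (List.range ys.length).map (fun k => (ys.take k).sum) ++ [ys.sum] := by
      rw [List.range_succ, List.map_append]
      simp
    have hget : PySem.List.pyGetD
        ((List.range (ys.length + 1)).map (fun k => (ys.take k).sum)) (-1) 0 = ys.sum := by
      rw [hlast, PySem.List.pyGetD_neg_one_append_singleton]
    rw [hget]
    have hlen : (ys ++ [v]).length = ys.length + 1 := by simp
    rw [hlen, List.range_succ (n := ys.length + 1), List.map_append]
    congr 1
    · apply List.map_congr_left
      intro k hk
      have hk' : k ≤ ys.length := by
        have := List.mem_range.mp hk; omega
      simp [List.take_append_of_le_length hk']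
    · simp

lemma pvPrefix_get (visited : List Int) (j : Int) (h0 : 0 ≤ j) (hj : j ≤ (visited.length : Int)) :
    PySem.List.pyGetD (pvPrefix visited) j 0 = (visited.take j.toNat).sum := by
  rw [pvPrefix_eq]
  rw [PySem.List.pyGetD_eq_getElem _ 0 h0 (by simp; omega)]
  simp

lemma pvW_step (visited : List Int) (x a n : Int) (hx : 0 ≤ x) (hxa : x ≤ a) (ha : a < n)
    (hn : n ≤ (visited.length : Int)) :
    pvW visited x a - PySem.List.pyGetD visited (a - x) 0 + PySem.List.pyGetD visited a 0
      = pvW visited x (a + 1) := by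
  have h1 : (0:Int) ≤ a - x := by omega
  have h2 : a - x < (visited.length : Int) := by omega
  have h3 : a < (visited.length : Int) := by omega
  have h0a : (0:Int) ≤ a := by omega
  rw [PySem.List.pyGetD_eq_getElem _ 0 h1 h2, PySem.List.pyGetD_eq_getElem _ 0 h0a h3]
  unfold pvW
  have e1 : (a + 1).toNat = a.toNat + 1 := by omega
  have e2 : (a + 1 - x).toNat = (a - x).toNat + 1 := by omega
  rw [e1, e2, List.sum_take_succ _ _ (by omega), List.sum_take_succ _ _ (by omega)]
  ring

lemma foldA_eq (visited : List Int) (x n : Int) (hx : 0 ≤ x) (hn : n ≤ (visited.length : Int)) :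
    ∀ (k : Nat) (a m c : Int), x ≤ a → (n - a).toNat = k →
    (PySem.List.pyRange a n 1).foldl
      (fun (st : Int × Int × Int) i =>
        let cs := st.1 - PySem.List.pyGetD visited (i - x) 0 + PySem.List.pyGetD visited i 0
        if cs > st.2.1 then (cs, cs, 1)
        else if cs = st.2.1 then (cs, st.2.1, st.2.2 + 1)
        else (cs, st.2.1, st.2.2))
      (pvW visited x a, m, c)
    = ((PySem.List.pyRange a n 1).map (fun i => pvW visited x (i + 1))).foldl pvStep2
        (pvW visited x a, m, c) := by
  intro k
  induction k with
  | zero =>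
    intro a m c hxa hk
    rw [PySem.List.pyRange_one_eq_nil (by omega)]
    rfl
  | succ k ih =>
    intro a m c hxa hk
    have ha : a < n := by omega
    rw [PySem.List.pyRange_one_cons ha, List.foldl_cons, List.map_cons, List.foldl_cons]
    have hcs : pvW visited x a - PySem.List.pyGetD visited (a - x) 0
        + PySem.List.pyGetD visited a 0 = pvW visited x (a + 1) :=
      pvW_step visited x a n hx hxa ha hn
    simp only [hcs, pvStep2]
    split_ifs with h1 h2
    · exact ih (a + 1) (pvW visited x (a + 1)) 1 (by omega) (by omega)
    · exact ih (a + 1) m (c + 1) (by omega) (by omega)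
    · exact ih (a + 1) m c (by omega) (by omega)

lemma mc_fold (l : List Int) : ∀ (h : Int) (t : List Int) (w0 : Int),
    (l.foldl pvStep2 (w0, t.foldl max h, ((h :: t).count (t.foldl max h) : Int))).2
      = ((t ++ l).foldl max h, ((h :: (t ++ l)).count ((t ++ l).foldl max h) : Int)) := by
  induction l with
  | nil => intro h t w0; simp
  | cons w l ih =>
    intro h t w0
    have hmax : ∀ y ∈ h :: t, y ≤ t.foldl max h := by
      intro y hy
      rcases List.mem_cons.mp hy with rfl | hy
      · exact (PySem.List.le_foldl_max t y).1
      · exact (PySem.List.le_foldl_max t h).2 y hy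
    have hfm : (t ++ [w]).foldl max h = max (t.foldl max h) w := by
      rw [List.foldl_append]; rfl
    have hstep : pvStep2 (w0, t.foldl max h, ((h :: t).count (t.foldl max h) : Int)) w
        = (w, (t ++ [w]).foldl max h, ((h :: (t ++ [w])).count ((t ++ [w]).foldl max h) : Int)) := by
      unfold pvStep2
      dsimp only
      rw [hfm]
      split_ifs with h1 h2
      · have hm : max (t.foldl max h) w = w := max_eq_right (le_of_lt h1)
        have hnot : w ∉ h :: t := fun hmem => absurd (hmax w hmem) (not_le.mpr h1)
        have hcnt : (h :: (t ++ [w])).count w = 1 := by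
          have : (h :: (t ++ [w])) = (h :: t) ++ [w] := by simp
          rw [this, List.count_append, List.count_eq_zero.mpr hnot]
          simp
        rw [hm, hcnt]
        norm_num
      · have hm : max (t.foldl max h) w = t.foldl max h := by
          rw [h2]; exact max_self _
        have hcnt : (h :: (t ++ [w])).count (t.foldl max h)
            = (h :: t).count (t.foldl max h) + 1 := by
          have : (h :: (t ++ [w])) = (h :: t) ++ [w] := by simp
          rw [this, List.count_append, h2]
          simp
        rw [hm, hcnt]
        push_cast
        ring_nf
      · have hlt : w < t.foldl max h := by omega
        have hm : max (t.foldl max h) w = t.foldl max h := max_eq_left (le_of_lt hlt)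
        have hcnt : (h :: (t ++ [w])).count (t.foldl max h)
            = (h :: t).count (t.foldl max h) := by
          have : (h :: (t ++ [w])) = (h :: t) ++ [w] := by simp
          rw [this, List.count_append]
          simp [List.count_singleton]
          omega
        rw [hm, hcnt]
    rw [List.foldl_cons, hstep]
    have := ih h (t ++ [w]) w
    rw [List.append_assoc] at this
    simpa using this

lemma take_min_len (visited : List Int) (x : Int) (hx : 0 ≤ x) :
    visited.take (min x (visited.length : Int)).toNat = visited.take x.toNat := by
  have h : (min x (visited.length : Int)).toNat = min x.toNat visited.length := by omega
  rw [h, ← List.take_take, List.take_length]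

lemma first_window (visited : List Int) (x : Int) (hx : 0 ≤ x) :
    PySem.List.pyGetD (pvPrefix visited) (min x (visited.length : Int)) 0
      = (visited.take x.toNat).sum := by
  rw [pvPrefix_get _ _ (le_min hx (by omega)) (min_le_right _ _), take_min_len visited x hx]

lemma pvW_self (visited : List Int) (x : Int) :
    pvW visited x x = (visited.take x.toNat).sum := by
  unfold pvW
  rw [sub_self, Int.toNat_zero, List.take_zero, List.sum_nil, sub_zero]

-- ===== VERDICT (by name: the statement is the Claim_ definition above) =====
theorem count_visited_spec : Claim_equal_count_visited := by
  intro n x visited _ hpre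
  obtain ⟨hx, hor⟩ := hpre
  unfold Spec_count_visited count_visited count_visited_alt
  simp only [PySem.List.slice_to _ hx, first_window visited x hx, PySem.List.count_eq]
  by_cases hxn : n ≤ x
  · -- empty range: one window
    rw [PySem.List.pyRange_one_eq_nil hxn]
    simp [PySem.List.max?_id_cons]
  · have hxlt : x < n := by omega
    have hn : n ≤ (visited.length : Int) := by
      rcases hor with h | h
      · exact h
      · omega
    -- A side: the rolling fold is the fold of pvStep2 over the window sums
    rw [← pvW_self visited x,
        foldA_eq visited x n hx hn (n - x).toNat x (pvW visited x x) 1 le_rfl rfl]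
    -- B side: the window list is the mapped window sums
    rw [PySem.List.foldl_append_singleton_eq_map
        (fun i => PySem.List.pyGetD (pvPrefix visited) (i + 1) 0
          - PySem.List.pyGetD (pvPrefix visited) (i + 1 - x) 0) (PySem.List.pyRange x n 1)]
    have hmapeq : (PySem.List.pyRange x n 1).map
        (fun i => PySem.List.pyGetD (pvPrefix visited) (i + 1) 0
          - PySem.List.pyGetD (pvPrefix visited) (i + 1 - x) 0)
        = (PySem.List.pyRange x n 1).map (fun i => pvW visited x (i + 1)) := by
      apply List.map_congr_left
      intro i hi
      obtain ⟨hxi, hin⟩ := PySem.List.mem_pyRange_one.mp hi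
      rw [pvPrefix_get _ _ (by omega) (by omega), pvPrefix_get _ _ (by omega) (by omega)]
      rfl
    rw [hmapeq]
    -- both sides reduce to (max, count) over the same window list
    have hmc := mc_fold ((PySem.List.pyRange x n 1).map (fun i => pvW visited x (i + 1)))
      (pvW visited x x) [] (pvW visited x x)
    norm_num [List.count_singleton] at hmc
    rw [show ((List.foldl pvStep2 (pvW visited x x, pvW visited x x, (1:Int))
        ((PySem.List.pyRange x n 1).map (fun i => pvW visited x (i + 1)))).2.1,
        (List.foldl pvStep2 (pvW visited x x, pvW visited x x, (1:Int))
        ((PySem.List.pyRange x n 1).map (fun i => pvW visited x (i + 1)))).2.2)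
        = (List.foldl pvStep2 (pvW visited x x, pvW visited x x, (1:Int))
        ((PySem.List.pyRange x n 1).map (fun i => pvW visited x (i + 1)))).2 from rfl,
       hmc, List.singleton_append, PySem.List.max?_id_cons]
    simp
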